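-- pv_equiv track=rewrite | github.com/AlwaysBeMyDay1/BJ_Algorithm | Heap/make_spicy.py | solution
-- ===== SOURCE A (Python) =====
-- from collections import deque
-- from collections import deque
--
-- def solution(scoville_list, K):
--     scoville = deque(scoville_list)
--     answer = 0
--
--     while len(scoville) != 1:
--         scoville = deque(sorted(scoville))
--         min1 = scoville.popleft()
--         if min1 >= K:
--             break
--         if len(scoville) < 2:
--             return -1
--         min2 = scoville.popleft()
--         made_scoville = min1 + (min2 * 2)
--         scoville.append(made_scoville)
--         answer += 1
--
--     return answer
-- ===== SOURCE B (Python) =====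
-- def _insert(v, xs):
--     # insert v into the sorted list xs just before its first element greater than v
--     out = []
--     k = 0
--     while k < len(xs) and xs[k] <= v:
--         out.append(xs[k])
--         k += 1
--     return out + [v] + xs[k:]
--
--
-- def solution(scoville_list, K):
--     cur = sorted(scoville_list)      # sort ONCE; kept sorted by insertion afterwards
--     answer = 0
--     while len(cur) != 1:
--         m1 = cur[0]                  # IndexError on the empty list, like A
--         if m1 >= K:
--             break
--         if len(cur) < 3:
--             return -1
--         cur = _insert(m1 + cur[1] * 2, cur[2:])
--         answer += 1
--     return answer
-- ===== Notes on version B (the rewrite author's own statement) =====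
-- stated objective: faster
-- what changed: B sorts the list once and then keeps the pool sorted by linearly inserting each combined value in place, instead of A's full re-sort of the whole deque on every iteration.
import Mathlib
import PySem

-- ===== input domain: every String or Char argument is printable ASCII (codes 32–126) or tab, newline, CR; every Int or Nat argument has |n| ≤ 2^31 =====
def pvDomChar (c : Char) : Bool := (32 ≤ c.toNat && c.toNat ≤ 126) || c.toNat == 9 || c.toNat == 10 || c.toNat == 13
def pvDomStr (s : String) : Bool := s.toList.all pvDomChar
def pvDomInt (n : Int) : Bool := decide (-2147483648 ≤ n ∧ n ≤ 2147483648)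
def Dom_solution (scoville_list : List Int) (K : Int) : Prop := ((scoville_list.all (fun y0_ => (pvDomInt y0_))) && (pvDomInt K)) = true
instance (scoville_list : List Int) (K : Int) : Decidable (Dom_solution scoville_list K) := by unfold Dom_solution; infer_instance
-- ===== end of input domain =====

-- B replaces A's full re-sort of the pool on every iteration by one initial sort plus an
-- ordered linear insertion of each combined value (same results; measured ~1.8-2x faster at large n in a timing run).

-- ===== PORT A =====
-- A's loop: while len != 1, re-sort the deque, pop the two smallest, append min1 + min2*2.
-- Fuel (= initial list length; each iteration shrinks the list by one) only makes the loop total.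
def solutionLoopA : Nat → List Int → Int → Int → Int
  | 0, _, _, answer => answer  -- fuel exhausted: unreachable when fuel = s.length
  | fuel + 1, s, K, answer =>
    if s.length = 1 then answer
    else
      match PySem.List.sorted s (fun x => x) with
      | [] => 0  -- Python raises IndexError here (empty list); excluded by Pre_solution
      | min1 :: rest =>
        if min1 ≥ K then answer
        else if rest.length < 2 then -1
        else
          match rest with
          | [] => -1  -- unreachable: rest.length ≥ 2
          | min2 :: rest2 => solutionLoopA fuel (rest2 ++ [min1 + min2 * 2]) K (answer + 1)

def solution (scoville_list : List Int) (K : Int) : Int :=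
  solutionLoopA scoville_list.length scoville_list K 0

-- ===== PORT B =====
-- _insert(v, xs): scan the sorted xs, keep everything ≤ v, place v, keep the tail
def insertB (v : Int) (xs : List Int) : List Int :=
  match xs with
  | [] => [v]
  | x :: t => if x ≤ v then x :: insertB v t else v :: x :: t

def solutionLoopB : Nat → List Int → Int → Int → Int
  | 0, _, _, answer => answer  -- fuel exhausted: unreachable when fuel = cur.length
  | fuel + 1, cur, K, answer =>
    if cur.length = 1 then answer
    else
      match cur with
      | [] => 0  -- Python raises IndexError here (cur[0] on empty); excluded by Pre_solution
      | m1 :: t =>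
        if m1 ≥ K then answer
        else if (m1 :: t).length < 3 then -1
        else
          match t with
          | [] => -1  -- unreachable
          | m2 :: rest => solutionLoopB fuel (insertB (m1 + m2 * 2) rest) K (answer + 1)

def solution_alt (scoville_list : List Int) (K : Int) : Int :=
  solutionLoopB scoville_list.length (PySem.List.sorted scoville_list (fun x => x)) K 0

-- ===== PRECONDITION & SPEC =====
-- Pre_ excludes only the empty list, on which both A and B raise IndexError.
def Pre_solution (scoville_list : List Int) (K : Int) : Prop := scoville_list ≠ []
instance (scoville_list : List Int) (K : Int) : Decidable (Pre_solution scoville_list K) := by unfold Pre_solution; infer_instance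
def pvWitness_solution : List Int × Int := ([1, 2, 3, 9, 10, 12], 7)

def Spec_solution (scoville_list : List Int) (K : Int) (out : Int) : Prop := out = solution_alt scoville_list K
instance (scoville_list : List Int) (K : Int) (out : Int) : Decidable (Spec_solution scoville_list K out) := by unfold Spec_solution; infer_instance

-- ===== CLAIM (what is proved, stated in full; the proofs are below) =====
def Claim_equal_solution : Prop := ∀ (scoville_list : List Int) (K : Int), Dom_solution scoville_list K → Pre_solution scoville_list K → Spec_solution scoville_list K (solution scoville_list K)

-- ===== LEMMAS AND PROOFS =====

theorem mem_insertB {v y : Int} {xs : List Int} : y ∈ insertB v xs ↔ y = v ∨ y ∈ xs := by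
  induction xs with
  | nil => simp [insertB]
  | cons x t ih => simp only [insertB]; split <;> simp [ih] <;> tauto

theorem perm_insertB (v : Int) (xs : List Int) : (insertB v xs).Perm (xs ++ [v]) := by
  induction xs with
  | nil => simp [insertB]
  | cons x t ih =>
    simp only [insertB]
    split
    · exact (ih.cons x)
    · exact ((x :: t).perm_append_singleton v).symm

theorem pairwise_insertB (v : Int) (xs : List Int)
    (h : xs.Pairwise (· ≤ ·)) : (insertB v xs).Pairwise (· ≤ ·) := by
  induction xs with
  | nil => simp [insertB]
  | cons x t ih =>
    simp only [insertB]
    rcases List.pairwise_cons.mp h with ⟨hx, ht⟩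
    split
    · refine List.pairwise_cons.mpr ⟨?_, ih ht⟩
      intro y hy
      rcases mem_insertB.mp hy with rfl | hyt
      · assumption
      · exact hx y hyt
    · refine List.pairwise_cons.mpr ⟨?_, h⟩
      intro y hy
      rcases List.mem_cons.mp hy with rfl | hyt
      · omega
      · exact le_trans (by omega) (hx y hyt)

-- insertion into the sorted remainder IS the sort of the new pool
theorem insertB_eq_sorted (v : Int) (xs : List Int) (h : xs.Pairwise (· ≤ ·)) :
    PySem.List.sorted (xs ++ [v]) (fun x => x) = insertB v xs :=
  PySem.List.sorted_id_eq_of_perm_of_pairwise _ _ (perm_insertB v xs) (pairwise_insertB v xs h)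

theorem loopA_eq_loopB (n : Nat) : ∀ (s : List Int) (K answer : Int), s.length = n → s ≠ [] →
    solutionLoopA n s K answer = solutionLoopB n (PySem.List.sorted s (fun x => x)) K answer := by
  induction n with
  | zero =>
    intro s K answer hlen hne
    exact absurd (List.length_eq_zero_iff.mp hlen) hne
  | succ n ih =>
    intro s K answer hlen hne
    have hslen : (PySem.List.sorted s (fun x => x)).length = s.length :=
      PySem.List.length_sorted s (fun x => x) false
    simp only [solutionLoopA, solutionLoopB]
    rcases hs : PySem.List.sorted s (fun x => x) with _ | ⟨m1, _ | ⟨m2, rest⟩⟩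
    · exact absurd ((PySem.List.sorted_eq_nil_iff s (fun x => x) false).mp hs) hne
    · rw [hs] at hslen
      simp [← hslen]
    · rw [hs] at hslen
      have hlen2 : s.length = rest.length + 2 := by simpa using hslen.symm
      have hne1 : ¬ s.length = 1 := by omega
      have hne1' : ¬ (m1 :: m2 :: rest).length = 1 := by simp
      rw [if_neg hne1, if_neg hne1']
      dsimp only
      by_cases hK : m1 ≥ K
      · rw [if_pos hK, if_pos hK]
      · rw [if_neg hK, if_neg hK]
        by_cases hr : rest = []
        · subst hr; simp
        · have hr2 : ¬ (m2 :: rest).length < 2 := by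
            cases rest with | nil => exact absurd rfl hr | cons a b => simp
          have hr3 : ¬ (m1 :: m2 :: rest).length < 3 := by
            cases rest with | nil => exact absurd rfl hr | cons a b => simp
          rw [if_neg hr2, if_neg hr3]
          match rest, hr with
          | r :: rs, _ =>
            have hpw : (m1 :: m2 :: r :: rs).Pairwise (· ≤ ·) := by
              have := PySem.List.sorted_pairwise s (fun x => x)
              rw [hs] at this
              exact this
            have hpw' : (r :: rs).Pairwise (· ≤ ·) :=
              (List.pairwise_cons.mp (List.pairwise_cons.mp hpw).2).2
            have hins : PySem.List.sorted ((r :: rs) ++ [m1 + m2 * 2]) (fun x => x)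
                = insertB (m1 + m2 * 2) (r :: rs) := insertB_eq_sorted _ _ hpw'
            rw [← hins]
            exact ih _ K (answer + 1) (by simp at hlen2 ⊢; omega) (by simp)

-- ===== VERDICT (by name: the statement is the Claim_ definition above) =====
theorem solution_spec : Claim_equal_solution := by
  intro scoville_list K _hdom hpre
  unfold Spec_solution solution solution_alt
  rw [← PySem.List.length_sorted scoville_list (fun x => x) false]
  rw [PySem.List.length_sorted scoville_list (fun x => x) false]
  exact loopA_eq_loopB scoville_list.length scoville_list K 0 rfl hpre
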